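-- pv_equiv track=rewrite | github.com/SherzodOtajonov/cp-stuff | practice/Yet_Another_Bookshelf.py | solve
-- ===== SOURCE A (Python) =====
-- def solve(n):
--     start = n.index(1)
--     cur = 0
--     res = 0
--     for i in n[start:]:
--         if not i:
--             cur += 1
--         else:
--             res += cur
--             cur = 0
--
--     return res
-- ===== SOURCE B (Python) =====
-- def solve(n):
--     # locate the first book, strip trailing empty slots, count the gaps inside
--     first = n.index(1)
--     core = n[first:]
--     while core[-1] == 0:
--         core.pop()
--     return core.count(0)
-- ===== Notes on version B (the rewrite author's own statement) =====
-- stated objective: simpler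
-- what changed: Replaces A's accumulator scan (counting zero runs and flushing on each nonzero) by locating the first book, stripping trailing zeros from the suffix, and counting the zeros in what remains.
import Mathlib
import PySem

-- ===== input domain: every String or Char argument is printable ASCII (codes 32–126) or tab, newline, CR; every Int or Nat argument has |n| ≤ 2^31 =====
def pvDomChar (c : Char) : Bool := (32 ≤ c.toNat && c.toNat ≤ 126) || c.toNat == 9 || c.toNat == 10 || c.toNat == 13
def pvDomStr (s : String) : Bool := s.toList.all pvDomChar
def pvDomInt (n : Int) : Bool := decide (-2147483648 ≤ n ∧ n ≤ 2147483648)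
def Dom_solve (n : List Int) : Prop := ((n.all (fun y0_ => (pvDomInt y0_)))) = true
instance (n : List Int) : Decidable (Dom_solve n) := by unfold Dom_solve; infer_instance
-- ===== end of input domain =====

-- B strips trailing zeros from n[first:] and counts zeros in the rest; A scans with a run accumulator.

-- ===== PORT A =====
def solve (n : List Int) : Int :=
  match PySem.List.index? n 1 with
  | none => 0   -- unreachable: Pre_solve guarantees 1 ∈ n (Python raises ValueError here)
  | some start =>
    let p := (PySem.List.slice n (some (start : Int)) none).foldl
      (fun (st : Int × Int) i => if i = 0 then (st.1 + 1, st.2) else (0, st.2 + st.1)) (0, 0)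
    p.2

-- ===== PORT B =====
-- the 'while core[-1] == 0: core.pop()' loop of Source B
def stripLoop (l : List Int) : List Int :=
  if h : PySem.List.pyGet? l (-1) = some 0 then stripLoop l.dropLast else l
termination_by l.length
decreasing_by
  have hne : l ≠ [] := by
    intro hnil; rw [hnil] at h; simp [PySem.List.pyGet?] at h
  have := List.length_pos_of_ne_nil hne
  simp [List.length_dropLast]; omega

def solve_alt (n : List Int) : Int :=
  match PySem.List.index? n 1 with
  | none => 0   -- unreachable: Pre_solve guarantees 1 ∈ n (Python raises ValueError here)
  | some first =>
    let core := PySem.List.slice n (some (first : Int)) none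
    ((stripLoop core).count 0 : Int)

-- ===== PRECONDITION & SPEC =====
-- Pre_: exactly the inputs on which A returns (n.index(1) raises ValueError when 1 is absent).
def Pre_solve (n : List Int) : Prop := (1 : Int) ∈ n
instance (n : List Int) : Decidable (Pre_solve n) := by unfold Pre_solve; infer_instance
def pvWitness_solve : List Int := [0, 1, 0, 0, 1, 0]

def Spec_solve (n : List Int) (out : Int) : Prop := out = solve_alt n
instance (n : List Int) (out : Int) : Decidable (Spec_solve n out) := by unfold Spec_solve; infer_instance

-- ===== CLAIM (what is proved, stated in full; the proofs are below) =====
def Claim_equal_solve : Prop := ∀ (n : List Int), Dom_solve n → Pre_solve n → Spec_solve n (solve n)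

-- ===== LEMMAS AND PROOFS =====

-- A's fold over t lands at (trailing-zero run, zeros − trailing zeros).
theorem foldA_eq (t : List Int) :
    t.foldl (fun (st : Int × Int) i => if i = 0 then (st.1 + 1, st.2) else (0, st.2 + st.1)) (0, 0)
      = (((t.reverse.takeWhile (fun x => x == 0)).length : Int),
         (t.count 0 : Int) - ((t.reverse.takeWhile (fun x => x == 0)).length : Int)) := by
  induction t using List.reverseRecOn with
  | nil => simp
  | append_singleton ys y ih =>
    rw [List.foldl_append, ih]
    by_cases hy : y = 0
    · subst hy
      simp [List.count_append, List.takeWhile]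
    · simp [hy, List.count_append, beq_iff_eq]

theorem stripLoop_eq (l : List Int) :
    stripLoop l = (l.reverse.dropWhile (fun x => x == 0)).reverse := by
  induction l using List.reverseRecOn with
  | nil => rw [stripLoop]; simp [PySem.List.pyGet?]
  | append_singleton ys y ih =>
    rw [stripLoop]
    by_cases hy : y = 0
    · subst hy
      simp [PySem.List.pyGet?_neg_one_append_singleton, ih]
    · have : PySem.List.pyGet? (ys ++ [y]) (-1) = some y :=
        PySem.List.pyGet?_neg_one_append_singleton ys y
      simp [this, hy, beq_iff_eq]

theorem count_takeWhile_zero (r : List Int) :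
    (r.takeWhile (fun x => x == 0)).count 0 = (r.takeWhile (fun x => x == 0)).length := by
  rw [List.count_eq_length]
  intro b hb
  have hb0 : b = 0 := by simpa using List.mem_takeWhile_imp hb
  omega

theorem stripLoop_count (t : List Int) :
    ((stripLoop t).count 0 : Int)
      = (t.count 0 : Int) - ((t.reverse.takeWhile (fun x => x == 0)).length : Int) := by
  rw [stripLoop_eq]
  have hsplit : (t.reverse.takeWhile (fun x => x == 0)) ++ (t.reverse.dropWhile (fun x => x == 0))
      = t.reverse := List.takeWhile_append_dropWhile
  have hcount := congrArg (List.count 0) hsplit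
  rw [List.count_append, List.count_reverse] at hcount
  rw [List.count_reverse]
  have := count_takeWhile_zero t.reverse
  omega

-- ===== VERDICT (by name: the statement is the Claim_ definition above) =====
theorem solve_spec : Claim_equal_solve := by
  intro n _ _
  unfold Spec_solve solve solve_alt
  cases h : PySem.List.index? n 1 with
  | none => simp
  | some first =>
    simp only
    rw [foldA_eq, stripLoop_count]
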